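-- pv_equiv track=rewrite | github.com/MatthewDaws/AdventCode24 | advent/day16.py | trace_routes
-- ===== SOURCE A (Python) =====
-- def trace_routes(starts, preds):
--     to_visit = set(starts)
--     vertices_seen = set()
--     while len(to_visit) > 0:
--         vertex = to_visit.pop()
--         vertices_seen.add(vertex)
--         if preds[vertex] == None:
--             continue
--         for v in preds[vertex]:
--             if v not in vertices_seen:
--                 to_visit.add(v)
--     return set(v[:2] for v in vertices_seen)
-- ===== SOURCE B (Python) =====
-- def trace_routes(starts, preds):
--     seen = set(starts)
--     for _ in range(len(preds)):
--         seen = seen | {w for v in seen for w in (preds[v] or [])}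
--     return {v[:2] for v in seen}
-- ===== Notes on version B (the rewrite author's own statement) =====
-- stated objective: alternative
-- what changed: A explores the predecessor graph with a worklist set (pop one vertex at a time, pushing unseen predecessors); B instead computes the same reachable set as a bounded fixed-point iteration: len(preds) rounds of whole-frontier expansion 'seen |= {w for v in seen for w in (preds[v] or [])}', with no worklist at all.
-- outside the precondition, e.g. on trace_routes({(0, 0, 0)}, {(0, 0, 0): None, (2, 2, 2): [(9, 9, 9)]}): A returns {(0, 0)}, B returns {(0, 0)}
import Mathlib
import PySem

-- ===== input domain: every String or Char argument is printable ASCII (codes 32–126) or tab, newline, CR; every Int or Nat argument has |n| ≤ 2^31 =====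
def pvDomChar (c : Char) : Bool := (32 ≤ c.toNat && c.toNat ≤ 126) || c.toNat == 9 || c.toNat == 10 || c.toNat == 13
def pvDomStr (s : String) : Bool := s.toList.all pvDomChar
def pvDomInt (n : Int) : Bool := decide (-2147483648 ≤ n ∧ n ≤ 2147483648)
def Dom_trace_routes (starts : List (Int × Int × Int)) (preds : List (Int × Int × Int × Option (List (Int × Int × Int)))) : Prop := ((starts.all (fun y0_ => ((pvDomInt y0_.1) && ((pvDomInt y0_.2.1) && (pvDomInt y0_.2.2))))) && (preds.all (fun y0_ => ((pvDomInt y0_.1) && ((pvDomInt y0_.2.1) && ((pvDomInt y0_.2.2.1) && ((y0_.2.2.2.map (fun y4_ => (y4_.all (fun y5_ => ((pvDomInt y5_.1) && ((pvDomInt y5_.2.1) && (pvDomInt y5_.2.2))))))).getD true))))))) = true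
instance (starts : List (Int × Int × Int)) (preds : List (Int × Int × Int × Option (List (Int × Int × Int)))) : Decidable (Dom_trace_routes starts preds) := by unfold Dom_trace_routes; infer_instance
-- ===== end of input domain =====

-- B replaces A's worklist-set traversal by a bounded fixed-point iteration (len(preds) rounds
-- of whole-frontier expansion); same reachable set, different algorithm ("alternative").
-- Python returns a SET: both ports return its canonical strictly-sorted listing
-- (Python's set iteration order is not modelled; outputs are compared as sets).

-- ===== PORT A =====
-- the tuple input rows as dict items: key (x, y, d), value the optional predecessor list
def pvItems (preds : List (Int × Int × Int × Option (List (Int × Int × Int)))) :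
    List ((Int × Int × Int) × Option (List (Int × Int × Int))) :=
  preds.map (fun p => ((p.1, p.2.1, p.2.2.1), p.2.2.2))

def pvProj (v : Int × Int × Int) : Int × Int := (v.1, v.2.1)    -- v[:2]

-- 'for v in preds[vertex]:  if v not in vertices_seen: to_visit.add(v)'
def pvAddUnseen (seen tv : PySem.Set (Int × Int × Int)) (l : List (Int × Int × Int)) :
    PySem.Set (Int × Int × Int) :=
  l.foldl (fun s w => if PySem.Set.contains seen w then s else PySem.Set.add s w) tv

-- lemmas the definition of pvLoopA itself needs (invariant construction and termination)
lemma mem_pvAddUnseen {seen tv : PySem.Set (Int × Int × Int)} {l : List (Int × Int × Int)}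
    {x : Int × Int × Int} : x ∈ pvAddUnseen seen tv l ↔ x ∈ tv ∨ (x ∈ l ∧ x ∉ seen) := by
  induction l generalizing tv with
  | nil => simp [pvAddUnseen]
  | cons a t ih =>
    show x ∈ pvAddUnseen seen (if PySem.Set.contains seen a then tv else PySem.Set.add tv a) t ↔ _
    by_cases ha : a ∈ seen
    · rw [if_pos ((PySem.Set.contains_iff _ _).mpr ha), ih]
      constructor
      · rintro (h | ⟨h1, h2⟩)
        · exact Or.inl h
        · exact Or.inr ⟨List.mem_cons_of_mem _ h1, h2⟩
      · rintro (h | ⟨h1, h2⟩)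
        · exact Or.inl h
        · rcases List.mem_cons.mp h1 with rfl | h1
          · exact absurd ha h2
          · exact Or.inr ⟨h1, h2⟩
    · have hc : PySem.Set.contains seen a = false := by
        by_contra hcc
        exact ha ((PySem.Set.contains_iff _ _).mp (by simpa using hcc))
      rw [if_neg (by simpa using ha), ih]
      constructor
      · rintro (h | ⟨h1, h2⟩)
        · rcases (PySem.Set.mem_add _ _ _).mp h with h | rfl
          · exact Or.inl h
          · exact Or.inr ⟨List.mem_cons_self, ha⟩
        · exact Or.inr ⟨List.mem_cons_of_mem _ h1, h2⟩
      · rintro (h | ⟨h1, h2⟩)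
        · exact Or.inl ((PySem.Set.mem_add _ _ _).mpr (Or.inl h))
        · rcases List.mem_cons.mp h1 with rfl | h1
          · exact Or.inl ((PySem.Set.mem_add _ _ _).mpr (Or.inr rfl))
          · exact Or.inr ⟨h1, h2⟩

lemma pvAddUnseen_eq_self {seen tv : PySem.Set (Int × Int × Int)} {l : List (Int × Int × Int)}
    (h : ∀ w ∈ l, w ∉ seen → w ∈ tv) : pvAddUnseen seen tv l = tv := by
  induction l generalizing tv with
  | nil => rfl
  | cons a t ih =>
    show pvAddUnseen seen (if PySem.Set.contains seen a then tv else PySem.Set.add tv a) t = tv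
    by_cases ha : a ∈ seen
    · rw [if_pos ((PySem.Set.contains_iff _ _).mpr ha)]
      exact ih (fun w hw => h w (List.mem_cons_of_mem _ hw))
    · have hc : PySem.Set.contains seen a = false := by
        by_contra hcc
        exact ha ((PySem.Set.contains_iff _ _).mp (by simpa using hcc))
      rw [if_neg (by simpa using ha), PySem.Set.add_of_mem (h a List.mem_cons_self ha)]
      exact ih (fun w hw => h w (List.mem_cons_of_mem _ hw))

def pvKeyGap (pr : PySem.Dict (Int × Int × Int) (Option (List (Int × Int × Int))))
    (seen : List (Int × Int × Int)) : Nat :=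
  ((PySem.Set.ofList pr.keys).filter (fun u => !(List.contains seen u))).length

lemma pvFilterMono {α : Type} (L : List α) (p q : α → Bool)
    (h : ∀ x ∈ L, q x = true → p x = true) : (L.filter q).length ≤ (L.filter p).length := by
  induction L with
  | nil => simp
  | cons a t ih =>
    have ih' := ih (fun x hx => h x (List.mem_cons_of_mem _ hx))
    by_cases hq : q a = true
    · simp [hq, h a List.mem_cons_self hq]
      omega
    · simp only [List.filter_cons]
      rw [if_neg (by simpa using hq)]
      by_cases hp : p a = true
      · simp [hp]; omega
      · rw [if_neg (by simpa using hp)]; exact ih'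

lemma pvFilterStrict {α : Type} (L : List α) (p q : α → Bool)
    (h : ∀ x ∈ L, q x = true → p x = true) (v : α) (hv : v ∈ L) (hp : p v = true)
    (hq : q v = false) : (L.filter q).length < (L.filter p).length := by
  induction L with
  | nil => cases hv
  | cons a t ih =>
    have hmono := pvFilterMono t p q (fun x hx => h x (List.mem_cons_of_mem _ hx))
    simp only [List.filter_cons]
    rcases List.mem_cons.mp hv with rfl | hv'
    · rw [if_pos hp, if_neg (by simp [hq])]
      simpa using Nat.lt_succ_of_le hmono
    · have ih' := ih (fun x hx => h x (List.mem_cons_of_mem _ hx)) hv'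
      by_cases hqa : q a = true
      · rw [if_pos hqa, if_pos (h a List.mem_cons_self hqa)]
        simpa using ih'
      · rw [if_neg (by simpa using hqa)]
        by_cases hpa : p a = true
        · rw [if_pos hpa]
          exact Nat.lt_succ_of_lt ih'
        · rw [if_neg (by simpa using hpa)]
          exact ih'

lemma pvKeyGap_lt (pr : PySem.Dict (Int × Int × Int) (Option (List (Int × Int × Int))))
    (seen : List (Int × Int × Int)) (vertex : Int × Int × Int)
    (hk : vertex ∈ pr.keys) (hnot : vertex ∉ seen) :
    pvKeyGap pr (PySem.Set.add seen vertex) < pvKeyGap pr seen := by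
  unfold pvKeyGap
  refine pvFilterStrict _ _ _ ?_ vertex ((PySem.Set.mem_ofList _ _).mpr hk) ?_ ?_
  · intro x hx hq
    simp only [Bool.not_eq_true', List.contains_eq_mem, decide_eq_false_iff_not] at hq ⊢
    exact fun hc => hq ((PySem.Set.mem_add _ _ _).mpr (Or.inl hc))
  · simpa using hnot
  · simp [(PySem.Set.mem_add _ _ _).mpr (Or.inr (rfl : (vertex : Int × Int × Int) = vertex))]

-- A's while loop; pops the head of the worklist (Python pops an arbitrary set element; the
-- resulting SET does not depend on the order).  none = KeyError (preds[vertex] missing).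
def pvLoopA (pr : PySem.Dict (Int × Int × Int) (Option (List (Int × Int × Int)))) :
    (tv : PySem.Set (Int × Int × Int)) → (seen : PySem.Set (Int × Int × Int)) →
    (hinv : ∀ v ∈ seen, ∀ l, pr.get? v = some (some l) → ∀ w ∈ l, w ∈ seen ∨ w ∈ tv) →
    Option (PySem.Set (Int × Int × Int))
  | [], seen, _ => some seen
  | vertex :: rest, seen, hinv =>
    match h : pr.get? vertex with
    | none => none
    | some none =>
        pvLoopA pr rest (PySem.Set.add seen vertex) (by
          intro v hv l' hget w hw
          rcases (PySem.Set.mem_add _ _ _).mp hv with hv | hv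
          · rcases hinv v hv l' hget w hw with h1 | h1
            · exact Or.inl ((PySem.Set.mem_add _ _ _).mpr (Or.inl h1))
            · rcases List.mem_cons.mp h1 with h2 | h2
              · exact Or.inl ((PySem.Set.mem_add _ _ _).mpr (Or.inr h2))
              · exact Or.inr h2
          · subst hv; rw [h] at hget; cases hget)
    | some (some l) =>
        pvLoopA pr (pvAddUnseen (PySem.Set.add seen vertex) rest l)
          (PySem.Set.add seen vertex) (by
          intro v hv l' hget w hw
          rcases (PySem.Set.mem_add _ _ _).mp hv with hv | hv
          · rcases hinv v hv l' hget w hw with h1 | h1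
            · exact Or.inl ((PySem.Set.mem_add _ _ _).mpr (Or.inl h1))
            · rcases List.mem_cons.mp h1 with h2 | h2
              · exact Or.inl ((PySem.Set.mem_add _ _ _).mpr (Or.inr h2))
              · exact Or.inr (mem_pvAddUnseen.mpr (Or.inl h2))
          · subst hv; rw [h] at hget
            have hl : l' = l := by cases hget; rfl
            subst hl
            by_cases hws : w ∈ PySem.Set.add seen v
            · exact Or.inl hws
            · exact Or.inr (mem_pvAddUnseen.mpr (Or.inr ⟨hw, hws⟩)))
  termination_by tv seen _ => (pvKeyGap pr seen, tv.length)
  decreasing_by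
  · -- 'continue' branch (preds[vertex] is None)
    by_cases hv : vertex ∈ seen
    · rw [PySem.Set.add_of_mem hv]
      exact Prod.Lex.right _ (Nat.lt_succ_self _)
    · exact Prod.Lex.left _ _ (pvKeyGap_lt pr seen vertex
        (by
          by_contra hk
          exact (by simpa [h] using (PySem.Dict.get?_eq_none_iff_not_mem_keys pr vertex).mpr hk))
        hv)
  · -- main branch
    by_cases hv : vertex ∈ seen
    · rw [PySem.Set.add_of_mem hv]
      have heq : pvAddUnseen (PySem.Set.add seen vertex) rest l = rest := by
        apply pvAddUnseen_eq_self
        intro w hw hws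
        have hwn : w ∉ seen := fun hc => hws ((PySem.Set.mem_add _ _ _).mpr (Or.inl hc))
        rcases hinv vertex hv l h w hw with h1 | h1
        · exact absurd h1 hwn
        · rcases List.mem_cons.mp h1 with rfl | h2
          · exact absurd ((PySem.Set.mem_add _ _ _).mpr (Or.inr rfl)) hws
          · exact h2
      rw [PySem.Set.add_of_mem hv] at heq
      rw [heq]
      exact Prod.Lex.right _ (Nat.lt_succ_self _)
    · exact Prod.Lex.left _ _ (pvKeyGap_lt pr seen vertex
        (by
          by_contra hk
          exact (by simpa [h] using (PySem.Dict.get?_eq_none_iff_not_mem_keys pr vertex).mpr hk))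
        hv)

def trace_routes (starts : List (Int × Int × Int))
    (preds : List (Int × Int × Int × Option (List (Int × Int × Int)))) : List (Int × Int) :=
  let pr := PySem.Dict.mk (pvItems preds)
  match pvLoopA pr (PySem.Set.ofList starts) PySem.Set.empty
      (by intro v hv l hget w hw; simp [PySem.Set.empty] at hv) with
  | none => []     -- Python raises KeyError here: excluded by Pre_trace_routes
  | some seen =>
      PySem.List.sorted (PySem.Set.ofList (seen.map pvProj)) (fun p => toLex p) false

-- ===== PORT B =====
-- '{w for v in seen for w in (preds[v] or [])}'; none = KeyError
def pvNewSet (pr : PySem.Dict (Int × Int × Int) (Option (List (Int × Int × Int))))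
    (seen : List (Int × Int × Int)) : Option (PySem.Set (Int × Int × Int)) :=
  seen.foldl
    (fun acc v => acc.bind (fun s => (pr.get? v).map (fun o => PySem.Set.update s (o.getD []))))
    (some PySem.Set.empty)

-- 'for _ in range(len(preds)): seen = seen | {...}'
def pvLoopB (pr : PySem.Dict (Int × Int × Int) (Option (List (Int × Int × Int)))) :
    Nat → Option (PySem.Set (Int × Int × Int)) → Option (PySem.Set (Int × Int × Int))
  | 0, s => s
  | n + 1, s =>
      pvLoopB pr n (s.bind (fun sn => (pvNewSet pr sn).map (fun ns => PySem.Set.union sn ns)))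

def trace_routes_alt (starts : List (Int × Int × Int))
    (preds : List (Int × Int × Int × Option (List (Int × Int × Int)))) : List (Int × Int) :=
  let pr := PySem.Dict.mk (pvItems preds)
  match pvLoopB pr preds.length (some (PySem.Set.ofList starts)) with
  | none => []     -- Python raises KeyError here: excluded by Pre_trace_routes
  | some seen =>
      PySem.List.sorted (PySem.Set.ofList (seen.map pvProj)) (fun p => toLex p) false

-- ===== PRECONDITION & SPEC =====
-- Pre_ admits the empty start list (A visits nothing) and otherwise requires every start vertex
-- and every vertex listed in a predecessor list to be a key of preds.  A raises KeyError exactly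
-- when a REACHABLE vertex is missing; reachability is not a closed-form condition, so Pre_
-- conservatively requires all mentioned vertices to be keys, excluding some inputs with dangling
-- references that A never reaches (on which A returns).
def Pre_trace_routes (starts : List (Int × Int × Int))
    (preds : List (Int × Int × Int × Option (List (Int × Int × Int)))) : Prop :=
  starts = [] ∨
  (∀ s ∈ starts, s ∈ preds.map (fun p => ((p.1, p.2.1, p.2.2.1) : Int × Int × Int))) ∧
  (∀ p ∈ preds, ∀ w ∈ (p.2.2.2.getD []),
      w ∈ preds.map (fun p => ((p.1, p.2.1, p.2.2.1) : Int × Int × Int)))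
instance (starts : List (Int × Int × Int)) (preds : List (Int × Int × Int × Option (List (Int × Int × Int)))) : Decidable (Pre_trace_routes starts preds) := by unfold Pre_trace_routes; infer_instance

def pvWitness_trace_routes :
    (List (Int × Int × Int)) × (List (Int × Int × Int × Option (List (Int × Int × Int)))) :=
  ([(0, 0, 0)], [(0, 0, 1, some [(0, 0, 0)]), (0, 0, 0, none)])

def Spec_trace_routes (starts : List (Int × Int × Int)) (preds : List (Int × Int × Int × Option (List (Int × Int × Int)))) (out : List (Int × Int)) : Prop := out = trace_routes_alt starts preds
instance (starts : List (Int × Int × Int)) (preds : List (Int × Int × Int × Option (List (Int × Int × Int)))) (out : List (Int × Int)) : Decidable (Spec_trace_routes starts preds out) := by unfold Spec_trace_routes; infer_instance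

-- ===== CLAIM (what is proved, stated in full; the proofs are below) =====
def Claim_equal_trace_routes : Prop := ∀ (starts : List (Int × Int × Int)) (preds : List (Int × Int × Int × Option (List (Int × Int × Int)))), Dom_trace_routes starts preds → Pre_trace_routes starts preds → Spec_trace_routes starts preds (trace_routes starts preds)

-- ===== LEMMAS AND PROOFS =====

-- vertices reachable from `base` through the predecessor lists
inductive pvReach (pr : PySem.Dict (Int × Int × Int) (Option (List (Int × Int × Int))))
    (base : List (Int × Int × Int)) : (Int × Int × Int) → Prop
  | base {v} : v ∈ base → pvReach pr base v
  | step {u l v} : pvReach pr base u → pr.get? u = some (some l) → v ∈ l → pvReach pr base v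

lemma pvReach_trans {pr : PySem.Dict (Int × Int × Int) (Option (List (Int × Int × Int)))}
    {base base' : List (Int × Int × Int)} (h : ∀ b ∈ base', pvReach pr base b)
    {x : Int × Int × Int} (hx : pvReach pr base' x) : pvReach pr base x := by
  induction hx with
  | base hv => exact h _ hv
  | step _ hget hmem ih => exact pvReach.step ih hget hmem

lemma pvGetMkMem {ps : List ((Int × Int × Int) × Option (List (Int × Int × Int)))}
    {v : Int × Int × Int} {o : Option (List (Int × Int × Int))}
    (h : (PySem.Dict.mk ps).get? v = some o) : (v, o) ∈ ps := by
  induction ps with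
  | nil => simp [PySem.Dict.get?] at h
  | cons p rest ih =>
    rw [show (PySem.Dict.mk (p :: rest)) = PySem.Dict.mk ((p.1, p.2) :: rest) by rfl,
      PySem.Dict.get?_mk_cons] at h
    by_cases hk : p.1 = v
    · simp only [hk, beq_self_eq_true, if_pos] at h
      cases h
      rw [← hk]
      exact List.mem_cons_self
    · rw [if_neg (by simpa using hk)] at h
      exact List.mem_cons_of_mem _ (ih h)

-- closure hypothesis derived from Pre_
def pvClosed (pr : PySem.Dict (Int × Int × Int) (Option (List (Int × Int × Int)))) : Prop :=
  ∀ v o, pr.get? v = some o → ∀ w ∈ o.getD [], w ∈ pr.keys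

-- correctness of A's loop
lemma pvLoopA_main (pr : PySem.Dict (Int × Int × Int) (Option (List (Int × Int × Int))))
    (hcl : pvClosed pr) :
    ∀ (tv seen : PySem.Set (Int × Int × Int)) hinv,
      (∀ v ∈ tv, v ∈ pr.keys) → (∀ v ∈ seen, v ∈ pr.keys) → seen.Nodup →
      ∃ s, pvLoopA pr tv seen hinv = some s ∧ s.Nodup ∧
        (∀ x ∈ seen, x ∈ s) ∧ (∀ x ∈ tv, x ∈ s) ∧
        (∀ x ∈ s, x ∈ seen ∨ pvReach pr tv x) ∧
        (∀ v ∈ s, ∀ l, pr.get? v = some (some l) → ∀ w ∈ l, w ∈ s) := by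
  intro tv seen hinv
  induction tv, seen, hinv using pvLoopA.induct pr with
  | case1 seen hinv _ =>
    intro _ hseen hnd
    refine ⟨seen, by simp [pvLoopA], hnd, fun x hx => hx, by simp, fun x hx => Or.inl hx, ?_⟩
    intro v hv l hget w hw
    rcases hinv v hv l hget w hw with h1 | h1
    · exact h1
    · cases h1
  | case2 vertex rest seen hinv h _ =>
    intro htv _ _
    exact absurd ((PySem.Dict.get?_eq_none_iff_not_mem_keys pr vertex).mp h)
      (by simpa using htv vertex List.mem_cons_self)
  | case3 vertex rest seen hinv h _ ih =>
    intro htv hseen hnd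
    have hkv : vertex ∈ pr.keys := by
      by_contra hk
      rw [(PySem.Dict.get?_eq_none_iff_not_mem_keys pr vertex).mpr hk] at h
      cases h
    obtain ⟨s, hrun, hnods, hsub, hsubtv, hsound, hcls⟩ :=
      ih (fun v hv => htv v (List.mem_cons_of_mem _ hv))
        (fun v hv => by
          rcases (PySem.Set.mem_add _ _ _).mp hv with h1 | rfl
          · exact hseen v h1
          · exact hkv)
        (PySem.Set.nodup_add _ _ hnd)
    refine ⟨s, ?_, hnods, ?_, ?_, ?_, hcls⟩
    · rw [pvLoopA]
      split
      · rename_i heq; rw [h] at heq; cases heq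
      · exact hrun
      · rename_i heq; rw [h] at heq; cases heq
    · exact fun x hx => hsub x ((PySem.Set.mem_add _ _ _).mpr (Or.inl hx))
    · intro x hx
      rcases List.mem_cons.mp hx with rfl | hx'
      · exact hsub x ((PySem.Set.mem_add _ _ _).mpr (Or.inr rfl))
      · exact hsubtv x hx'
    · intro x hx
      rcases hsound x hx with h1 | h1
      · rcases (PySem.Set.mem_add _ _ _).mp h1 with h2 | rfl
        · exact Or.inl h2
        · exact Or.inr (pvReach.base List.mem_cons_self)
      · exact Or.inr (pvReach_trans (fun b hb => pvReach.base (List.mem_cons_of_mem _ hb)) h1)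
  | case4 vertex rest seen hinv l h _ ih =>
    intro htv hseen hnd
    have hkv : vertex ∈ pr.keys := by
      by_contra hk
      rw [(PySem.Dict.get?_eq_none_iff_not_mem_keys pr vertex).mpr hk] at h
      cases h
    have hlk : ∀ w ∈ l, w ∈ pr.keys := by
      intro w hw
      exact hcl vertex (some l) h w (by simpa using hw)
    obtain ⟨s, hrun, hnods, hsub, hsubtv, hsound, hcls⟩ :=
      ih (fun v hv => by
          rcases mem_pvAddUnseen.mp hv with h1 | ⟨h1, _⟩
          · exact htv v (List.mem_cons_of_mem _ h1)
          · exact hlk v h1)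
        (fun v hv => by
          rcases (PySem.Set.mem_add _ _ _).mp hv with h1 | rfl
          · exact hseen v h1
          · exact hkv)
        (PySem.Set.nodup_add _ _ hnd)
    refine ⟨s, ?_, hnods, ?_, ?_, ?_, hcls⟩
    · rw [pvLoopA]
      split
      · rename_i heq; rw [h] at heq; cases heq
      · rename_i heq; rw [h] at heq; cases heq
      · rename_i l' heq
        rw [h] at heq
        cases heq
        exact hrun
    · exact fun x hx => hsub x ((PySem.Set.mem_add _ _ _).mpr (Or.inl hx))
    · intro x hx
      rcases List.mem_cons.mp hx with rfl | hx'
      · exact hsub x ((PySem.Set.mem_add _ _ _).mpr (Or.inr rfl))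
      · exact hsubtv x (mem_pvAddUnseen.mpr (Or.inl hx'))
    · intro x hx
      rcases hsound x hx with h1 | h1
      · rcases (PySem.Set.mem_add _ _ _).mp h1 with h2 | rfl
        · exact Or.inl h2
        · exact Or.inr (pvReach.base List.mem_cons_self)
      · refine Or.inr (pvReach_trans ?_ h1)
        intro b hb
        rcases mem_pvAddUnseen.mp hb with h2 | ⟨h2, _⟩
        · exact pvReach.base (List.mem_cons_of_mem _ h2)
        · exact pvReach.step (pvReach.base List.mem_cons_self) h h2

-- the pure (error-free) value of pvNewSet / of one round of B's loop
def pvNewPure (pr : PySem.Dict (Int × Int × Int) (Option (List (Int × Int × Int))))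
    (seen : List (Int × Int × Int)) : PySem.Set (Int × Int × Int) :=
  seen.foldl (fun s v => PySem.Set.update s (((pr.get? v).getD none).getD [])) PySem.Set.empty

def pvStep (pr : PySem.Dict (Int × Int × Int) (Option (List (Int × Int × Int))))
    (s : PySem.Set (Int × Int × Int)) : PySem.Set (Int × Int × Int) :=
  PySem.Set.union s (pvNewPure pr s)

def pvIter (pr : PySem.Dict (Int × Int × Int) (Option (List (Int × Int × Int)))) :
    Nat → PySem.Set (Int × Int × Int) → PySem.Set (Int × Int × Int)
  | 0, s => s
  | n + 1, s => pvIter pr n (pvStep pr s)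

lemma pvNewSet_eq (pr : PySem.Dict (Int × Int × Int) (Option (List (Int × Int × Int))))
    (seen : List (Int × Int × Int)) (h : ∀ v ∈ seen, (pr.get? v).isSome) :
    pvNewSet pr seen = some (pvNewPure pr seen) := by
  unfold pvNewSet pvNewPure
  generalize PySem.Set.empty = s
  induction seen generalizing s with
  | nil => rfl
  | cons a t ih =>
    obtain ⟨o, ho⟩ := Option.isSome_iff_exists.mp (h a List.mem_cons_self)
    simp only [List.foldl_cons, Option.bind_some, ho, Option.map_some]
    exact ih (fun v hv => h v (List.mem_cons_of_mem _ hv)) _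

lemma mem_pvNewPure {pr : PySem.Dict (Int × Int × Int) (Option (List (Int × Int × Int)))}
    {seen : List (Int × Int × Int)} {x : Int × Int × Int} :
    x ∈ pvNewPure pr seen ↔ ∃ v ∈ seen, x ∈ ((pr.get? v).getD none).getD [] := by
  unfold pvNewPure
  have aux : ∀ (l : List (Int × Int × Int)) (s : PySem.Set (Int × Int × Int)),
      x ∈ l.foldl (fun s v => PySem.Set.update s (((pr.get? v).getD none).getD [])) s ↔
        x ∈ s ∨ ∃ v ∈ l, x ∈ ((pr.get? v).getD none).getD [] := by
    intro l
    induction l with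
    | nil => simp
    | cons a t ih =>
      intro s
      simp only [List.foldl_cons, ih, PySem.Set.mem_update]
      constructor
      · rintro ((h | h) | ⟨v, hv, hx⟩)
        · exact Or.inl h
        · exact Or.inr ⟨a, List.mem_cons_self, h⟩
        · exact Or.inr ⟨v, List.mem_cons_of_mem _ hv, hx⟩
      · rintro (h | ⟨v, hv, hx⟩)
        · exact Or.inl (Or.inl h)
        · rcases List.mem_cons.mp hv with rfl | hv'
          · exact Or.inl (Or.inr hx)
          · exact Or.inr ⟨v, hv', hx⟩
  rw [aux]
  simp [PySem.Set.empty]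

lemma mem_pvStep {pr : PySem.Dict (Int × Int × Int) (Option (List (Int × Int × Int)))}
    {s : PySem.Set (Int × Int × Int)} {x : Int × Int × Int} :
    x ∈ pvStep pr s ↔ x ∈ s ∨ ∃ v ∈ s, x ∈ ((pr.get? v).getD none).getD [] := by
  unfold pvStep
  rw [PySem.Set.mem_union, mem_pvNewPure]

lemma pvStep_keys {pr : PySem.Dict (Int × Int × Int) (Option (List (Int × Int × Int)))}
    (hcl : pvClosed pr) {s : PySem.Set (Int × Int × Int)} (hs : ∀ v ∈ s, v ∈ pr.keys) :
    ∀ v ∈ pvStep pr s, v ∈ pr.keys := by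
  intro x hx
  rcases mem_pvStep.mp hx with h | ⟨v, hv, hxl⟩
  · exact hs x h
  · cases ho : pr.get? v with
    | none => rw [ho] at hxl; simp at hxl
    | some o => rw [ho] at hxl; exact hcl v o ho x hxl

lemma pvStep_reach {pr : PySem.Dict (Int × Int × Int) (Option (List (Int × Int × Int)))}
    {base : List (Int × Int × Int)} {s : PySem.Set (Int × Int × Int)}
    (hb : ∀ x ∈ s, pvReach pr base x) : ∀ x ∈ pvStep pr s, pvReach pr base x := by
  intro x hx
  rcases mem_pvStep.mp hx with h | ⟨v, hv, hxl⟩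
  · exact hb x h
  · cases ho : pr.get? v with
    | none => rw [ho] at hxl; simp at hxl
    | some o =>
      rw [ho] at hxl
      cases o with
      | none => simp at hxl
      | some l => exact pvReach.step (hb v hv) ho hxl

lemma pvStep_nodup {pr : PySem.Dict (Int × Int × Int) (Option (List (Int × Int × Int)))}
    {s : PySem.Set (Int × Int × Int)} (hs : s.Nodup) : (pvStep pr s).Nodup :=
  PySem.Set.nodup_union _ _ hs

lemma pvStep_append {pr : PySem.Dict (Int × Int × Int) (Option (List (Int × Int × Int)))}
    (s : PySem.Set (Int × Int × Int)) : ∃ ex, pvStep pr s = s ++ ex := by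
  exact ⟨_, PySem.Set.update_eq_append_filter _ _⟩

lemma pvStep_grow {pr : PySem.Dict (Int × Int × Int) (Option (List (Int × Int × Int)))}
    {s : PySem.Set (Int × Int × Int)} (h : pvStep pr s ≠ s) :
    s.length + 1 ≤ (pvStep pr s).length := by
  obtain ⟨ex, hex⟩ := pvStep_append (pr := pr) s
  cases ex with
  | nil => exact absurd (by simpa using hex) h
  | cons a t => rw [hex]; simp

lemma pvIter_fix {pr : PySem.Dict (Int × Int × Int) (Option (List (Int × Int × Int)))}
    {s : PySem.Set (Int × Int × Int)} (h : pvStep pr s = s) : ∀ n, pvIter pr n s = s := by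
  intro n
  induction n with
  | zero => rfl
  | succ n ih => show pvIter pr n (pvStep pr s) = s; rw [h]; exact ih

lemma pvIter_mono {pr : PySem.Dict (Int × Int × Int) (Option (List (Int × Int × Int)))}
    {x : Int × Int × Int} : ∀ n s, x ∈ s → x ∈ pvIter pr n s := by
  intro n
  induction n with
  | zero => exact fun s h => h
  | succ n ih =>
    intro s h
    exact ih _ (PySem.Set.mem_union _ _ _ |>.mpr (Or.inl h))

lemma pvIter_pres {pr : PySem.Dict (Int × Int × Int) (Option (List (Int × Int × Int)))}
    (P : PySem.Set (Int × Int × Int) → Prop) (hstep : ∀ s, P s → P (pvStep pr s)) :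
    ∀ n s, P s → P (pvIter pr n s) := by
  intro n
  induction n with
  | zero => exact fun s h => h
  | succ n ih => exact fun s h => ih _ (hstep _ h)

lemma pvIter_progress (pr : PySem.Dict (Int × Int × Int) (Option (List (Int × Int × Int)))) :
    ∀ n s, pvStep pr (pvIter pr n s) = pvIter pr n s ∨ s.length + n ≤ (pvIter pr n s).length := by
  intro n
  induction n with
  | zero => exact fun s => Or.inr (by simp [pvIter])
  | succ n ih =>
    intro s
    by_cases hfix : pvStep pr s = s
    · left
      show pvStep pr (pvIter pr n (pvStep pr s)) = pvIter pr n (pvStep pr s)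
      rw [hfix, pvIter_fix hfix, hfix]
    · rcases ih (pvStep pr s) with h | h
      · exact Or.inl h
      · right
        show s.length + (n + 1) ≤ (pvIter pr n (pvStep pr s)).length
        have := pvStep_grow (pr := pr) hfix
        omega

lemma pvLoopB_eq (pr : PySem.Dict (Int × Int × Int) (Option (List (Int × Int × Int))))
    (hcl : pvClosed pr) :
    ∀ n (s : PySem.Set (Int × Int × Int)), (∀ v ∈ s, v ∈ pr.keys) →
      pvLoopB pr n (some s) = some (pvIter pr n s) := by
  intro n
  induction n with
  | zero => exact fun s _ => rfl
  | succ n ih =>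
    intro s hk
    have hsome : ∀ v ∈ s, (pr.get? v).isSome := by
      intro v hv
      cases ho : pr.get? v with
      | none => exact absurd ((PySem.Dict.get?_eq_none_iff_not_mem_keys pr v).mp ho) (by simpa using hk v hv)
      | some o => rfl
    show pvLoopB pr n ((some s).bind _) = _
    rw [Option.bind_some]
    rw [pvNewSet_eq pr s hsome, Option.map_some]
    exact ih _ (pvStep_keys hcl hk)

-- B's loop computes exactly the reachable set (the heart of the equivalence)
lemma pvIter_reach_iff (pr : PySem.Dict (Int × Int × Int) (Option (List (Int × Int × Int))))
    (hcl : pvClosed pr) (N : Nat) (hN : (PySem.Set.ofList pr.keys).length ≤ N)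
    (S0 : PySem.Set (Int × Int × Int)) (hk : ∀ v ∈ S0, v ∈ pr.keys) (hnd : S0.Nodup) :
    ∀ x, x ∈ pvIter pr N S0 ↔ pvReach pr S0 x := by
  have hsound : ∀ y ∈ pvIter pr N S0, pvReach pr S0 y :=
    pvIter_pres (fun s => ∀ y ∈ s, pvReach pr S0 y) (fun s h => pvStep_reach h) N S0
      (fun y hy => pvReach.base hy)
  by_cases hS0 : S0 = []
  · subst hS0
    have hempty : ∀ y, pvReach pr ([] : List (Int × Int × Int)) y → False := by
      intro y hy
      induction hy with
      | base h => cases h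
      | step _ _ _ ih => exact ih
    have hfix : pvStep pr ([] : PySem.Set (Int × Int × Int)) = [] := rfl
    intro x
    rw [pvIter_fix hfix]
    simp only [List.not_mem_nil, false_iff]
    exact hempty x
  · have hnodupN : (pvIter pr N S0).Nodup :=
      pvIter_pres (fun s => s.Nodup) (fun s h => pvStep_nodup h) N S0 hnd
    have hkeysN : ∀ v ∈ pvIter pr N S0, v ∈ pr.keys :=
      pvIter_pres (fun s => ∀ v ∈ s, v ∈ pr.keys) (fun s h => pvStep_keys hcl h) N S0 hk
    have hbound : (pvIter pr N S0).length ≤ (PySem.Set.ofList pr.keys).length :=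
      (List.Nodup.subperm hnodupN
        (fun x hx => (PySem.Set.mem_ofList _ _).mpr (hkeysN x hx))).length_le
    have hfix : pvStep pr (pvIter pr N S0) = pvIter pr N S0 := by
      rcases pvIter_progress pr N S0 with h | h
      · exact h
      · have h1 : 1 ≤ S0.length := List.length_pos_iff.mpr hS0
        omega
    intro x
    constructor
    · exact hsound x
    · intro hx
      induction hx with
      | base hv => exact pvIter_mono N S0 hv
      | step _ hget hmem ih =>
        rw [← hfix]
        exact mem_pvStep.mpr (Or.inr ⟨_, ih, by rw [hget]; simpa using hmem⟩)

lemma pvLoopA_nil (pr : PySem.Dict (Int × Int × Int) (Option (List (Int × Int × Int))))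
    (seen : PySem.Set (Int × Int × Int)) (h : ∀ v ∈ seen, ∀ l, pr.get? v = some (some l) →
      ∀ w ∈ l, w ∈ seen ∨ w ∈ ([] : List (Int × Int × Int))) :
    pvLoopA pr [] seen h = some seen := by
  simp [pvLoopA]

lemma pvLoopB_nil (pr : PySem.Dict (Int × Int × Int) (Option (List (Int × Int × Int)))) :
    ∀ n, pvLoopB pr n (some ([] : PySem.Set (Int × Int × Int))) =
      some ([] : PySem.Set (Int × Int × Int)) := by
  intro n
  induction n with
  | zero => rfl
  | succ n ih => exact ih

lemma pvSorted_congr {sA sB : List (Int × Int × Int)} (hA : sA.Nodup) (hB : sB.Nodup)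
    (hmem : ∀ x, x ∈ sA ↔ x ∈ sB) :
    PySem.List.sorted (PySem.Set.ofList (sA.map pvProj)) (fun p => toLex p) false =
    PySem.List.sorted (PySem.Set.ofList (sB.map pvProj)) (fun p => toLex p) false := by
  have hperm : sA.Perm sB := (List.perm_ext_iff_of_nodup hA hB).mpr hmem
  have hm : (sA.map pvProj).Perm (sB.map pvProj) := hperm.map _
  have h2 : (PySem.Set.ofList (sA.map pvProj)).Perm (PySem.Set.ofList (sB.map pvProj)) := by
    apply (List.perm_ext_iff_of_nodup (PySem.Set.nodup_ofList _) (PySem.Set.nodup_ofList _)).mpr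
    intro x
    rw [PySem.Set.mem_ofList, PySem.Set.mem_ofList]
    exact hm.mem_iff
  exact PySem.List.sorted_eq_sorted_of_perm _ _ _ (Equiv.injective toLex) h2

-- ===== VERDICT (by name: the statement is the Claim_ definition above) =====
theorem trace_routes_spec : Claim_equal_trace_routes := by
  intro starts preds hdom hpre
  show trace_routes starts preds = trace_routes_alt starts preds
  rcases hpre with rfl | ⟨hpre1, hpre2⟩
  · -- starts = []: nothing is visited; both programs return the empty set
    simp only [trace_routes, trace_routes_alt, PySem.Set.ofList_nil]
    rw [pvLoopA_nil, pvLoopB_nil]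
    rfl
  set pr := PySem.Dict.mk (pvItems preds) with hpr
  have hkeys : pr.keys = preds.map (fun p => ((p.1, p.2.1, p.2.2.1) : Int × Int × Int)) := by
    simp [hpr, pvItems, PySem.Dict.keys_mk, List.map_map]
  have hcl : pvClosed pr := by
    intro v o hget w hw
    obtain ⟨p, hp, hpe⟩ := List.mem_map.mp (pvGetMkMem hget)
    have hv : v = (p.1, p.2.1, p.2.2.1) := by
      have := congrArg Prod.fst hpe
      simpa using this.symm
    have ho : o = p.2.2.2 := by
      have := congrArg Prod.snd hpe
      simpa using this.symm
    rw [hkeys]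
    exact hpre2 p hp w (by rw [← ho]; exact hw)
  have hstarts : ∀ v ∈ PySem.Set.ofList starts, v ∈ pr.keys := by
    intro v hv
    rw [hkeys]
    exact hpre1 v ((PySem.Set.mem_ofList _ _).mp hv)
  obtain ⟨sA, hrunA, hndA, _, hsubA, hsoundA, hclA⟩ :=
    pvLoopA_main pr hcl (PySem.Set.ofList starts) PySem.Set.empty
      (by intro v hv l hget w hw; simp [PySem.Set.empty] at hv)
      hstarts (by intro v hv; simp [PySem.Set.empty] at hv) (by simp [PySem.Set.empty])
  have hA_iff : ∀ x, x ∈ sA ↔ pvReach pr (PySem.Set.ofList starts) x := by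
    intro x
    constructor
    · intro hx
      rcases hsoundA x hx with h1 | h1
      · simp [PySem.Set.empty] at h1
      · exact h1
    · intro hr
      induction hr with
      | base hv => exact hsubA _ hv
      | step _ hget hmem ih => exact hclA _ ih _ hget _ hmem
  have hN : (PySem.Set.ofList pr.keys).length ≤ preds.length := by
    calc (PySem.Set.ofList pr.keys).length ≤ pr.keys.length := PySem.Set.length_ofList_le _
    _ = preds.length := by rw [hkeys]; simp
  have hB_iff := pvIter_reach_iff pr hcl preds.length hN (PySem.Set.ofList starts) hstarts
    (PySem.Set.nodup_ofList _)
  have hndB : (pvIter pr preds.length (PySem.Set.ofList starts)).Nodup :=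
    pvIter_pres (fun s => s.Nodup) (fun s h => pvStep_nodup h) _ _ (PySem.Set.nodup_ofList _)
  have hrunB := pvLoopB_eq pr hcl preds.length (PySem.Set.ofList starts) hstarts
  show (match pvLoopA pr (PySem.Set.ofList starts) PySem.Set.empty
      (by intro v hv l hget w hw; simp [PySem.Set.empty] at hv) with
    | none => ([] : List (Int × Int))
    | some seen => PySem.List.sorted (PySem.Set.ofList (seen.map pvProj)) (fun p => toLex p) false) =
    (match pvLoopB pr preds.length (some (PySem.Set.ofList starts)) with
    | none => ([] : List (Int × Int))
    | some seen => PySem.List.sorted (PySem.Set.ofList (seen.map pvProj)) (fun p => toLex p) false)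
  rw [hrunA, hrunB]
  exact pvSorted_congr hndA hndB (fun x => (hA_iff x).trans (hB_iff x).symm)
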